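-- pv_equiv track=rewrite | github.com/pypi-data/pypi-mirror-372 | packages/aurora-trinity/aurora_trinity-1.1.1-py3-none-any.whl/trinity_3/core_backup.py | fibonacci_stepping_indices
-- ===== SOURCE A (Python) =====
-- def fibonacci(n):
--     a, b = 1, 1
--     for _ in range(n):
--         a, b = b, a + b
--     return a
--
-- def fibonacci_stepping_indices(N, k, trios=3, start_step=0):
--     """Devuelve una lista de índices para formar un trío usando pasos de Fibonacci."""
--     indices = []
--     idx = k
--     for i in range(start_step, start_step + trios):
--         step = fibonacci(i)
--         indices.append(idx % N)
--         idx = (idx + step) % N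
--     return indices
-- ===== SOURCE B (Python) =====
-- def fibonacci_stepping_indices(N, k, trios=3, start_step=0):
--     """Same indices, computed with a single running Fibonacci pair: advance the
--     pair to start_step once, then update it in O(1) per produced index."""
--     if trios <= 0:
--         return []
--     a, b = 1, 1
--     for _ in range(start_step):
--         a, b = b, a + b
--     indices = []
--     idx = k
--     for _ in range(trios):
--         indices.append(idx % N)
--         idx = (idx + a) % N
--         a, b = b, a + b
--     return indices
-- ===== Notes on version B (the rewrite author's own statement) =====
-- stated objective: faster
-- what changed: B carries one running Fibonacci pair (advanced to start_step once, then one O(1) update per produced index) instead of recomputing fibonacci(i) with an inner loop at every step; Pre_ excludes only inputs where A raises ZeroDivisionError (N = 0 with trios > 0), where B raises too.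
-- intended difference: For start_step < 0 (visible once trios >= 4 and |N| != 1) A's helper returns fibonacci(i) = 1 for every negative i because range(i) is empty, so A steps by a constant 1 until i reaches 0; B advances the genuine Fibonacci progression 1,1,2,3,... from the first iteration, which is the intended stepping. — e.g. on fibonacci_stepping_indices(5, 0, 4, -1): A returns [0, 1, 2, 3], B returns [0, 1, 2, 4]
import Mathlib
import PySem

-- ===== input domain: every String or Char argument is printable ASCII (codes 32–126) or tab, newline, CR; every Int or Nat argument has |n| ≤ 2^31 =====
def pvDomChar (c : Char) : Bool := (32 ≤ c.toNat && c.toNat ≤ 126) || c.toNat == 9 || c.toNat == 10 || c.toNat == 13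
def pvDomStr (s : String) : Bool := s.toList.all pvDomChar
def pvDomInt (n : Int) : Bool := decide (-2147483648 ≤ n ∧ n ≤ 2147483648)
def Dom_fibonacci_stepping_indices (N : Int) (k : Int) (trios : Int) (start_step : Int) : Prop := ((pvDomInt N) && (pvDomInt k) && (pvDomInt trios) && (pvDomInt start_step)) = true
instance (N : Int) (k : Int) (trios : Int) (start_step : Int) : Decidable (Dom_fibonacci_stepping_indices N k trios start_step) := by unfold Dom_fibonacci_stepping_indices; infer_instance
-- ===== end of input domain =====

-- B replaces A's per-step recomputation of fibonacci(i) by one running Fibonacci pair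
-- (objective: faster, asymptotically); for start_step < 0 A's constant-1 steps are an
-- artefact of range() over a negative count, stated as an intended difference D_ below.

-- ===== PORT A =====
-- helper `fibonacci` of A: a,b = 1,1; for _ in range(n): a,b = b,a+b; return a
def pvFibPair (n : Int) : Int × Int :=
  (PySem.List.pyRange 0 n 1).foldl (fun (p : Int × Int) _ => (p.2, p.1 + p.2)) (1, 1)

def pvFib (n : Int) : Int := (pvFibPair n).1

-- A's loop body: step = fibonacci(i); indices.append(idx % N); idx = (idx + step) % N
def pvStepA (N : Int) (st : List Int × Int) (i : Int) : List Int × Int :=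
  let step := pvFib i
  (st.1 ++ [PySem.Int.mod st.2 N], PySem.Int.mod (st.2 + step) N)

def fibonacci_stepping_indices (N : Int) (k : Int) (trios : Int) (start_step : Int) : List Int :=
  ((PySem.List.pyRange start_step (start_step + trios) 1).foldl (pvStepA N) ([], k)).1

-- ===== PORT B =====
-- B's loop body (loop variable unused): append idx % N; idx = (idx + a) % N; a,b = b,a+b
def pvB1 (N : Int) (st : (List Int × Int) × (Int × Int)) : (List Int × Int) × (Int × Int) :=
  ((st.1.1 ++ [PySem.Int.mod st.1.2 N], PySem.Int.mod (st.1.2 + st.2.1) N),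
   (st.2.2, st.2.1 + st.2.2))

def pvStepB (N : Int) (st : (List Int × Int) × (Int × Int)) (_ : Int) :
    (List Int × Int) × (Int × Int) := pvB1 N st

def fibonacci_stepping_indices_alt (N : Int) (k : Int) (trios : Int) (start_step : Int) : List Int :=
  -- if trios <= 0: return []
  if trios ≤ 0 then [] else
  -- inner fold: a,b = 1,1; for _ in range(start_step): a,b = b,a+b
  -- outer fold: for _ in range(trios): …
  ((PySem.List.pyRange 0 trios 1).foldl (pvStepB N)
    (([], k),
     (PySem.List.pyRange 0 start_step 1).foldl
       (fun (p : Int × Int) _ => (p.2, p.1 + p.2)) (1, 1))).1.1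

-- ===== PRECONDITION & SPEC =====
-- Pre_ excludes exactly the inputs where Python A raises ZeroDivisionError (N = 0 with a
-- non-empty loop); Python B raises there too.
def Pre_fibonacci_stepping_indices (N : Int) (k : Int) (trios : Int) (start_step : Int) : Prop :=
  trios ≤ 0 ∨ N ≠ 0
instance (N : Int) (k : Int) (trios : Int) (start_step : Int) : Decidable (Pre_fibonacci_stepping_indices N k trios start_step) := by unfold Pre_fibonacci_stepping_indices; infer_instance

def pvWitness_fibonacci_stepping_indices : Int × Int × Int × Int := (5, 2, 3, 0)

-- For start_step < 0 (visible once trios ≥ 4 and |N| ≠ 1) A's helper returns 1 for every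
-- negative i because range(i) is empty, so A steps by a constant 1 until i reaches 0;
-- B advances the genuine Fibonacci progression 1,1,2,3,… from the first iteration,
-- which is the intended stepping.
def D_fibonacci_stepping_indices (N : Int) (k : Int) (trios : Int) (start_step : Int) : Prop :=
  start_step < 0 ∧ 4 ≤ trios ∧ N ≠ 1 ∧ N ≠ -1
instance (N : Int) (k : Int) (trios : Int) (start_step : Int) : Decidable (D_fibonacci_stepping_indices N k trios start_step) := by unfold D_fibonacci_stepping_indices; infer_instance

def Spec_fibonacci_stepping_indices (N : Int) (k : Int) (trios : Int) (start_step : Int) (out : List Int) : Prop := ¬ D_fibonacci_stepping_indices N k trios start_step → out = fibonacci_stepping_indices_alt N k trios start_step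
instance (N : Int) (k : Int) (trios : Int) (start_step : Int) (out : List Int) : Decidable (Spec_fibonacci_stepping_indices N k trios start_step out) := by unfold Spec_fibonacci_stepping_indices; infer_instance

def pvDiffWitness_fibonacci_stepping_indices : Int × Int × Int × Int := (5, 0, 4, -1)
def pvDiffWitnessOut_fibonacci_stepping_indices : (List Int) × (List Int) := ([0, 1, 2, 3], [0, 1, 2, 4])

-- ===== CLAIM (what is proved, stated in full; the proofs are below) =====
def Claim_unchanged_fibonacci_stepping_indices : Prop := ∀ (N : Int) (k : Int) (trios : Int) (start_step : Int), Dom_fibonacci_stepping_indices N k trios start_step → Pre_fibonacci_stepping_indices N k trios start_step → Spec_fibonacci_stepping_indices N k trios start_step (fibonacci_stepping_indices N k trios start_step)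
def Claim_changed_fibonacci_stepping_indices : Prop := Dom_fibonacci_stepping_indices (pvDiffWitness_fibonacci_stepping_indices.1) (pvDiffWitness_fibonacci_stepping_indices.2.1) (pvDiffWitness_fibonacci_stepping_indices.2.2.1) (pvDiffWitness_fibonacci_stepping_indices.2.2.2) ∧ Pre_fibonacci_stepping_indices (pvDiffWitness_fibonacci_stepping_indices.1) (pvDiffWitness_fibonacci_stepping_indices.2.1) (pvDiffWitness_fibonacci_stepping_indices.2.2.1) (pvDiffWitness_fibonacci_stepping_indices.2.2.2) ∧ D_fibonacci_stepping_indices (pvDiffWitness_fibonacci_stepping_indices.1) (pvDiffWitness_fibonacci_stepping_indices.2.1) (pvDiffWitness_fibonacci_stepping_indices.2.2.1) (pvDiffWitness_fibonacci_stepping_indices.2.2.2) ∧ fibonacci_stepping_indices (pvDiffWitness_fibonacci_stepping_indices.1) (pvDiffWitness_fibonacci_stepping_indices.2.1) (pvDiffWitness_fibonacci_stepping_indices.2.2.1) (pvDiffWitness_fibonacci_stepping_indices.2.2.2) = pvDiffWitnessOut_fibonacci_stepping_indices.1 ∧ fibonacci_stepping_indices_alt (pvDiffWitness_fibonacci_stepping_indices.1)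 (pvDiffWitness_fibonacci_stepping_indices.2.1) (pvDiffWitness_fibonacci_stepping_indices.2.2.1) (pvDiffWitness_fibonacci_stepping_indices.2.2.2) = pvDiffWitnessOut_fibonacci_stepping_indices.2 ∧ pvDiffWitnessOut_fibonacci_stepping_indices.1 ≠ pvDiffWitnessOut_fibonacci_stepping_indices.2

def Claim_exact_fibonacci_stepping_indices : Prop := ∀ (N : Int) (k : Int) (trios : Int) (start_step : Int), Dom_fibonacci_stepping_indices N k trios start_step → Pre_fibonacci_stepping_indices N k trios start_step → D_fibonacci_stepping_indices N k trios start_step → fibonacci_stepping_indices N k trios start_step ≠ fibonacci_stepping_indices_alt N k trios start_step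

-- ===== LEMMAS AND PROOFS =====

-- advancing the pair once extends the Fibonacci fold by one step (0 ≤ s)
lemma pvFibPair_succ (s : Int) (hs : 0 ≤ s) :
    pvFibPair (s + 1) = ((pvFibPair s).2, (pvFibPair s).1 + (pvFibPair s).2) := by
  unfold pvFibPair
  rw [PySem.List.pyRange_one_succ_right hs, List.foldl_append]
  simp

lemma pvFibPair_nonpos (s : Int) (hs : s ≤ 0) : pvFibPair s = (1, 1) := by
  unfold pvFibPair
  rw [PySem.List.pyRange_one_eq_nil (by omega)]
  rfl

lemma pvFib_nonpos (s : Int) (hs : s ≤ 0) : pvFib s = 1 := by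
  unfold pvFib; rw [pvFibPair_nonpos s hs]

-- B's fold ignores the loop variable: it is an iterate of pvB1
lemma foldB_iterate (N : Int) : ∀ (l : List Int) (init : (List Int × Int) × (Int × Int)),
    l.foldl (pvStepB N) init = (pvB1 N)^[l.length] init := by
  intro l
  induction l with
  | nil => intro init; rfl
  | cons a t ih =>
      intro init
      simp only [List.foldl_cons, List.length_cons, Function.iterate_succ_apply]
      exact ih (pvB1 N init)

-- loop invariant: A's fold from s with fresh fib recomputation = n iterates of B's body
-- carrying the pair pvFibPair s (for 0 ≤ s)
lemma pv_main (N : Int) (n : Nat) : ∀ (s : Int) (acc : List Int) (idx : Int), 0 ≤ s →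
    ((PySem.List.pyRange s (s + n) 1).foldl (pvStepA N) (acc, idx)).1
      = ((pvB1 N)^[n] ((acc, idx), pvFibPair s)).1.1 := by
  induction n with
  | zero =>
      intro s acc idx _
      simp
  | succ m ih =>
      intro s acc idx hs
      have hlt : s < s + ((m : Int) + 1) := by omega
      have hcast : s + ((m + 1 : Nat) : Int) = s + ((m : Int) + 1) := by push_cast; ring
      rw [hcast, PySem.List.pyRange_one_cons hlt]
      have hsplit : s + ((m : Int) + 1) = (s + 1) + (m : Int) := by ring
      rw [hsplit]
      simp only [List.foldl_cons, Function.iterate_succ_apply]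
      have hA : pvStepA N (acc, idx) s
          = (acc ++ [PySem.Int.mod idx N], PySem.Int.mod (idx + pvFib s) N) := rfl
      have hB : pvB1 N ((acc, idx), pvFibPair s)
          = ((acc ++ [PySem.Int.mod idx N], PySem.Int.mod (idx + pvFib s) N),
             pvFibPair (s + 1)) := by
        unfold pvB1 pvFib
        rw [pvFibPair_succ s hs]
      rw [hA, hB]
      exact ih (s + 1) (acc ++ [PySem.Int.mod idx N]) (PySem.Int.mod (idx + pvFib s) N) (by omega)

-- N = ±1: every appended value is 0
lemma pvMod_one (N : Int) (hN : N = 1 ∨ N = -1) (x : Int) : PySem.Int.mod x N = 0 := by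
  rcases hN with rfl | rfl
  · simp [PySem.Int.mod, Int.fmod_eq_zero_of_dvd (one_dvd x)]
  · simp [PySem.Int.mod, Int.fmod_eq_zero_of_dvd (⟨-x, by ring⟩ : (-1 : Int) ∣ x)]

lemma repA (N : Int) (hN : N = 1 ∨ N = -1) : ∀ (l : List Int) (acc : List Int) (idx : Int),
    ((l.foldl (pvStepA N) (acc, idx)).1) = acc ++ List.replicate l.length 0 := by
  intro l
  induction l with
  | nil => intro acc idx; simp
  | cons a t ih =>
      intro acc idx
      simp only [List.foldl_cons, List.length_cons, List.replicate_succ]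
      rw [show pvStepA N (acc, idx) a
            = (acc ++ [PySem.Int.mod idx N], PySem.Int.mod (idx + pvFib a) N) from rfl]
      rw [pvMod_one N hN idx, ih]
      simp

lemma repB (N : Int) (hN : N = 1 ∨ N = -1) : ∀ (n : Nat) (acc : List Int) (idx : Int) (ab : Int × Int),
    ((pvB1 N)^[n] ((acc, idx), ab)).1.1 = acc ++ List.replicate n 0 := by
  intro n
  induction n with
  | zero => intro acc idx ab; simp
  | succ m ih =>
      intro acc idx ab
      rw [Function.iterate_succ_apply]
      rw [show pvB1 N ((acc, idx), ab)
            = ((acc ++ [PySem.Int.mod idx N], PySem.Int.mod (idx + ab.1) N), (ab.2, ab.1 + ab.2)) from rfl]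
      rw [pvMod_one N hN idx, ih]
      simp [List.replicate_succ]

lemma pvFib_le_one (s : Int) (hs : s ≤ 1) : pvFib s = 1 := by
  by_cases h : s ≤ 0
  · exact pvFib_nonpos s h
  · have h1 : s = 1 := by omega
    subst h1; rfl

-- the first elements appended by A's fold are never changed afterwards
lemma foldA_prefix (N : Int) : ∀ (l : List Int) (acc : List Int) (idx : Int),
    ∃ t, (List.foldl (pvStepA N) (acc, idx) l).1 = acc ++ t := by
  intro l
  induction l with
  | nil => intro acc idx; exact ⟨[], by simp⟩
  | cons a r ih =>
      intro acc idx
      obtain ⟨t, ht⟩ := ih (acc ++ [PySem.Int.mod idx N]) (PySem.Int.mod (idx + pvFib a) N)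
      exact ⟨PySem.Int.mod idx N :: t, by simpa [pvStepA] using ht⟩

lemma foldB_prefix (N : Int) : ∀ (n : Nat) (acc : List Int) (idx : Int) (ab : Int × Int),
    ∃ t, ((pvB1 N)^[n] ((acc, idx), ab)).1.1 = acc ++ t := by
  intro n
  induction n with
  | zero => intro acc idx ab; exact ⟨[], by simp⟩
  | succ m ih =>
      intro acc idx ab
      obtain ⟨t, ht⟩ := ih (acc ++ [PySem.Int.mod idx N]) (PySem.Int.mod (idx + ab.1) N) (ab.2, ab.1 + ab.2)
      exact ⟨PySem.Int.mod idx N :: t, by simpa [Function.iterate_succ_apply, pvB1] using ht⟩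

lemma pvMod_sub_dvd (x N : Int) : N ∣ (PySem.Int.mod x N - x) := by
  exact ⟨-(PySem.Int.floordiv x N), by linear_combination PySem.Int.floordiv_mul_add_mod x N⟩

lemma pvMod_ne_of_not_cong (N x y : Int) (h : ¬ N ∣ (x - y)) :
    PySem.Int.mod x N ≠ PySem.Int.mod y N := by
  intro he
  apply h
  have hd := dvd_sub (pvMod_sub_dvd y N) (pvMod_sub_dvd x N)
  rw [← he] at hd
  have hxy : PySem.Int.mod x N - y - (PySem.Int.mod x N - x) = x - y := by ring
  rwa [hxy] at hd

-- steps that differ by 1 give different indices whenever |N| ≠ 1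
lemma pvMod_shift_ne (N z : Int) (h1 : N ≠ 1) (h2 : N ≠ -1) :
    PySem.Int.mod (PySem.Int.mod (z + 1) N) N ≠ PySem.Int.mod (PySem.Int.mod (z + 2) N) N := by
  intro he
  have hxy : N ∣ (PySem.Int.mod (z + 1) N - PySem.Int.mod (z + 2) N) := by
    by_contra h
    exact pvMod_ne_of_not_cong N _ _ h he
  have d1 := pvMod_sub_dvd (z + 1) N
  have d2 := pvMod_sub_dvd (z + 2) N
  have hc := dvd_add (dvd_sub hxy d1) d2
  have hr : PySem.Int.mod (z + 1) N - PySem.Int.mod (z + 2) N -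
      (PySem.Int.mod (z + 1) N - (z + 1)) + (PySem.Int.mod (z + 2) N - (z + 2)) = -1 := by ring
  rw [hr] at hc
  rcases Int.isUnit_iff.mp (isUnit_of_dvd_one (Int.dvd_neg.mp hc)) with h | h
  · exact h1 h
  · exact h2 h

-- ===== VERDICT (by name: the statements are the Claim_ definitions above) =====
theorem fibonacci_stepping_indices_spec : Claim_unchanged_fibonacci_stepping_indices := by
  intro N k trios ss _ hpre
  unfold Spec_fibonacci_stepping_indices
  intro hnD
  unfold fibonacci_stepping_indices fibonacci_stepping_indices_alt
  by_cases ht : trios ≤ 0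
  · rw [if_pos ht, PySem.List.pyRange_one_eq_nil (show ss + trios ≤ ss by omega)]
    rfl
  · rw [if_neg ht]
    by_cases hs : 0 ≤ ss
    · -- nonnegative start_step: the carried pair equals fibonacci(i) at every step
      rw [foldB_iterate]
      rw [PySem.List.length_pyRange_one]
      have hab : ((PySem.List.pyRange 0 ss 1).foldl
          (fun (p : Int × Int) _ => (p.2, p.1 + p.2)) (1, 1)) = pvFibPair ss := rfl
      rw [hab]
      have hcast : trios = ((trios.toNat : Nat) : Int) := by omega
      have := pv_main N trios.toNat ss [] k hs
      rw [← hcast] at this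
      simpa using this
    · -- start_step < 0
      unfold D_fibonacci_stepping_indices at hnD
      push Not at hnD
      by_cases hN : N = 1 ∨ N = -1
      · rw [foldB_iterate]
        rw [repA N hN, repB N hN]
        rw [PySem.List.length_pyRange_one, PySem.List.length_pyRange_one]
        congr 2
        omega
      · have h1 : N ≠ 1 := fun h => hN (Or.inl h)
        have h2 : N ≠ -1 := fun h => hN (Or.inr h)
        have ht3 : trios ≤ 3 := by
          by_contra hc
          exact h2 (hnD (by omega) (by omega) h1)
        have ht1 : 1 ≤ trios := by omega
        have hab : ((PySem.List.pyRange 0 ss 1).foldl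
            (fun (p : Int × Int) _ => (p.2, p.1 + p.2)) (1, 1)) = (1, 1) := by
          rw [PySem.List.pyRange_one_eq_nil (by omega)]
          rfl
        rw [hab]
        have hf0 : pvFib ss = 1 := pvFib_nonpos ss (by omega)
        have hf1 : pvFib (ss + 1) = 1 := pvFib_nonpos _ (by omega)
        interval_cases trios
        · rw [PySem.List.pyRange_one_cons (show ss < ss + 1 by omega),
              PySem.List.pyRange_one_eq_nil (show ss + 1 ≤ ss + 1 by omega),
              show PySem.List.pyRange 0 1 1 = [0] from rfl]
          simp [pvStepA, pvStepB, pvB1, hf0]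
        · rw [PySem.List.pyRange_one_cons (show ss < ss + 2 by omega),
              PySem.List.pyRange_one_cons (show ss + 1 < ss + 2 by omega),
              PySem.List.pyRange_one_eq_nil (show ss + 2 ≤ ss + 1 + 1 by omega),
              show PySem.List.pyRange 0 2 1 = [0, 1] from rfl]
          simp [pvStepA, pvStepB, pvB1, hf0, hf1]
        · rw [PySem.List.pyRange_one_cons (show ss < ss + 3 by omega),
              PySem.List.pyRange_one_cons (show ss + 1 < ss + 3 by omega),
              PySem.List.pyRange_one_cons (show ss + 1 + 1 < ss + 3 by omega),
              PySem.List.pyRange_one_eq_nil (show ss + 3 ≤ ss + 1 + 1 + 1 by omega),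
              show PySem.List.pyRange 0 3 1 = [0, 1, 2] from rfl]
          simp [pvStepA, pvStepB, pvB1, hf0, hf1]

theorem fibonacci_stepping_indices_changed : Claim_changed_fibonacci_stepping_indices := by
  unfold Claim_changed_fibonacci_stepping_indices; decide

theorem fibonacci_stepping_indices_tight : Claim_exact_fibonacci_stepping_indices := by
  intro N k trios ss _ hpre hD
  obtain ⟨hss, ht4, hN1, hN2⟩ := hD
  intro hEq
  have hf0 : pvFib ss = 1 := pvFib_le_one ss (by omega)
  have hf1 : pvFib (ss + 1) = 1 := pvFib_le_one _ (by omega)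
  have hf2 : pvFib (ss + 1 + 1) = 1 := pvFib_le_one _ (by omega)
  obtain ⟨tA, hA⟩ : ∃ t, fibonacci_stepping_indices N k trios ss =
      [PySem.Int.mod k N,
       PySem.Int.mod (PySem.Int.mod (k + 1) N) N,
       PySem.Int.mod (PySem.Int.mod (PySem.Int.mod (k + 1) N + 1) N) N,
       PySem.Int.mod (PySem.Int.mod (PySem.Int.mod (PySem.Int.mod (k + 1) N + 1) N + 1) N) N] ++ t := by
    unfold fibonacci_stepping_indices
    rw [PySem.List.pyRange_one_append ss (ss + 4) (ss + trios) (by omega) (by omega),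
        List.foldl_append,
        PySem.List.pyRange_one_cons (show ss < ss + 4 by omega),
        PySem.List.pyRange_one_cons (show ss + 1 < ss + 4 by omega),
        PySem.List.pyRange_one_cons (show ss + 1 + 1 < ss + 4 by omega),
        PySem.List.pyRange_one_cons (show ss + 1 + 1 + 1 < ss + 4 by omega),
        PySem.List.pyRange_one_eq_nil (show ss + 4 ≤ ss + 1 + 1 + 1 + 1 by omega)]
    simp only [List.foldl_cons, List.foldl_nil, pvStepA, hf0, hf1, hf2,
               List.nil_append, List.append_assoc, List.singleton_append]
    exact foldA_prefix N _ _ _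
  obtain ⟨tB, hB⟩ : ∃ t, fibonacci_stepping_indices_alt N k trios ss =
      [PySem.Int.mod k N,
       PySem.Int.mod (PySem.Int.mod (k + 1) N) N,
       PySem.Int.mod (PySem.Int.mod (PySem.Int.mod (k + 1) N + 1) N) N,
       PySem.Int.mod (PySem.Int.mod (PySem.Int.mod (PySem.Int.mod (k + 1) N + 1) N + 2) N) N] ++ t := by
    unfold fibonacci_stepping_indices_alt
    rw [if_neg (by omega), foldB_iterate, PySem.List.length_pyRange_one]
    have hab : (List.foldl (fun (p : Int × Int) _ => (p.2, p.1 + p.2)) (1, 1)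
        (PySem.List.pyRange 0 ss 1)) = ((1 : Int), (1 : Int)) := by
      rw [PySem.List.pyRange_one_eq_nil (by omega)]
      rfl
    rw [hab]
    have hn : (trios - 0).toNat = (trios - 4).toNat + 4 := by omega
    rw [hn, Function.iterate_add_apply]
    have h4 : (pvB1 N)^[4] (([], k), (1, 1)) =
        (([PySem.Int.mod k N,
           PySem.Int.mod (PySem.Int.mod (k + 1) N) N,
           PySem.Int.mod (PySem.Int.mod (PySem.Int.mod (k + 1) N + 1) N) N,
           PySem.Int.mod (PySem.Int.mod (PySem.Int.mod (PySem.Int.mod (k + 1) N + 1) N + 2) N) N],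
          PySem.Int.mod (PySem.Int.mod (PySem.Int.mod (PySem.Int.mod (k + 1) N + 1) N + 2) N + 3) N),
         (5, 8)) := by
      rfl
    rw [h4]
    exact foldB_prefix N _ _ _ _
  rw [hA, hB] at hEq
  simp at hEq
  exact pvMod_shift_ne N (PySem.Int.mod (PySem.Int.mod (k + 1) N + 1) N) hN1 hN2 hEq.1
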